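-- pv_equiv track=rewrite | github.com/ivanmena2021/app-sac | query_llm.py | _extract_where_clause
-- ===== SOURCE A (Python) =====
-- def _extract_where_clause(sql):
--     """
--     Extrae la cláusula WHERE de una SQL.
--     Retorna la cláusula completa incluyendo 'WHERE ...' o string vacío.
--     """
--     sql_upper = sql.upper()
--
--     # Buscar WHERE
--     where_start = -1
--     # Encontrar el WHERE principal (no de subconsultas)
--     depth = 0
--     i = 0
--     while i < len(sql_upper):
--         if sql_upper[i] == '(':
--             depth += 1
--         elif sql_upper[i] == ')':
--             depth -= 1
--         elif depth == 0 and sql_upper[i:i+5] == 'WHERE':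
--             where_start = i
--             break
--         i += 1
--
--     if where_start == -1:
--         return ""
--
--     # Encontrar el final de WHERE (antes de GROUP BY, ORDER BY, LIMIT, HAVING, UNION, o fin)
--     where_end = len(sql)
--     for keyword in ['GROUP BY', 'ORDER BY', 'LIMIT', 'HAVING', 'UNION']:
--         pos = sql_upper.find(keyword, where_start + 5)
--         if pos != -1 and pos < where_end:
--             # Verificar que no estemos dentro de paréntesis
--             depth = 0
--             valid = True
--             for j in range(where_start, pos):
--                 if sql[j] == '(':
--                     depth += 1
--                 elif sql[j] == ')':
--                     depth -= 1
--                 if depth < 0: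
--                     valid = False
--                     break
--             if valid and depth == 0:
--                 where_end = pos
--
--     return sql[where_start:where_end].strip()
-- ===== SOURCE B (Python) =====
-- def _extract_where_clause(sql):
--     u = sql.upper()
--     n = len(sql)
--     # prefix paren depth: d[i] = depth just before index i
--     d = [0]
--     for c in u:
--         d.append(d[-1] + (1 if c == '(' else -1 if c == ')' else 0))
--     where_start = -1
--     for i in range(n):
--         if d[i] == 0 and u[i:i+5] == 'WHERE':
--             where_start = i
--             break
--     if where_start == -1:
--         return ""
--     # running minimum of d over [where_start, i]
--     rm = [d[where_start]]
--     for i in range(where_start + 1, n + 1):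
--         rm.append(min(rm[-1], d[i]))
--     where_end = n
--     for keyword in ('GROUP BY', 'ORDER BY', 'LIMIT', 'HAVING', 'UNION'):
--         pos = u.find(keyword, where_start + 5)
--         if pos != -1 and pos < where_end and d[pos] == 0 and rm[pos - where_start] >= 0:
--             where_end = pos
--     return sql[where_start:where_end].strip()
-- ===== Notes on version B (the rewrite author's own statement) =====
-- stated objective: alternative
-- what changed: Replaces A's per-keyword O(n) paren-depth rescan from where_start (and its running-depth WHERE search) with a prefix-depth array plus a running-minimum array built once, so each keyword candidate is validated by two O(1) table lookups.
import Mathlib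
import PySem

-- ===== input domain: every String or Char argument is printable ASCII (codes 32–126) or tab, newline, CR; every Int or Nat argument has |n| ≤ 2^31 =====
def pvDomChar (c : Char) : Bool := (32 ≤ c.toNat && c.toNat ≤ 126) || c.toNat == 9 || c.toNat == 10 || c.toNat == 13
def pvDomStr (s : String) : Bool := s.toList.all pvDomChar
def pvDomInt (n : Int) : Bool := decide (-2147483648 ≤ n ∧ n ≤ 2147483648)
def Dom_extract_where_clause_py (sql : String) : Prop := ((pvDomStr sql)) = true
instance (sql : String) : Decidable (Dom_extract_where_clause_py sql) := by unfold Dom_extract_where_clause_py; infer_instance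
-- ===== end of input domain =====

-- B replaces A's per-keyword depth rescans by one prefix-depth array plus a running-minimum
-- array, turning each keyword's top-level test into two O(1) lookups (alternative structure).

-- ===== PORT A =====
-- outer while loop: scan sql_upper tracking paren depth, stop at first top-level 'WHERE'
def pvA_findWhere (u : List Char) (i : Nat) (depth : Int) : Int :=
  if _h : i < u.length then
    if u[i]! = '(' then pvA_findWhere u (i + 1) (depth + 1)
    else if u[i]! = ')' then pvA_findWhere u (i + 1) (depth - 1)
    -- u[i:i+5] == 'WHERE'  (slice of both bounds ≥ 0: drop/take, exact by slice_natCast_add)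
    else if depth = 0 ∧ (u.drop i).take 5 = "WHERE".toList then (i : Int)
    else pvA_findWhere u (i + 1) depth
  else -1
termination_by u.length - i

-- inner 'for j in range(where_start, pos)' loop with the valid flag and break
def pvA_scan (s : List Char) (pos j : Nat) (depth : Int) : Bool × Int :=
  if _h : j < pos then
    let d := if s[j]! = '(' then depth + 1 else if s[j]! = ')' then depth - 1 else depth
    if d < 0 then (false, d) else pvA_scan s pos (j + 1) d
  else (true, depth)
termination_by pos - j

def extract_where_clause_py (sql : String) : String :=
  let s := sql.toList
  let u := PySem.Chars.upper s
  let ws := pvA_findWhere u 0 0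
  if ws = -1 then ""
  else
    let wsN := ws.toNat
    let we := (["GROUP BY", "ORDER BY", "LIMIT", "HAVING", "UNION"].map String.toList).foldl
      (fun we kw =>
        let pos := PySem.Chars.findFrom u kw ((wsN + 5 : Nat) : Int)
        if pos ≠ -1 ∧ pos < (we : Int) then
          let r := pvA_scan s pos.toNat wsN 0
          if r.1 ∧ r.2 = 0 then pos.toNat else we
        else we) s.length
    String.ofList (PySem.Chars.strip (PySem.List.slice s (some (wsN : Int)) (some (we : Int))))

-- ===== PORT B =====
-- d[i] = paren depth just before index i (built once, by the appending loop of Source B)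
def pvB_depths (cur : Int) : List Char → List Int
  | [] => [cur]
  | c :: rest => cur :: pvB_depths (cur + if c = '(' then 1 else if c = ')' then -1 else 0) rest

-- 'for i in range(n): if d[i]==0 and u[i:i+5]=="WHERE": break' loop
def pvB_findWhere (u : List Char) (d : List Int) (i : Nat) : Int :=
  if _h : i < u.length then
    if d[i]! = 0 ∧ (u.drop i).take 5 = "WHERE".toList then (i : Int)
    else pvB_findWhere u d (i + 1)
  else -1
termination_by u.length - i

-- running minimum list rm: rm[k] = min of d over [where_start, where_start+k]
def pvB_mins (cur : Int) : List Int → List Int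
  | [] => [cur]
  | x :: rest => cur :: pvB_mins (min cur x) rest

def extract_where_clause_py_alt (sql : String) : String :=
  let s := sql.toList
  let u := PySem.Chars.upper s
  let d := pvB_depths 0 u
  let ws := pvB_findWhere u d 0
  if ws = -1 then ""
  else
    let wsN := ws.toNat
    let rm := pvB_mins (d[wsN]!) (d.drop (wsN + 1))
    let we := (["GROUP BY", "ORDER BY", "LIMIT", "HAVING", "UNION"].map String.toList).foldl
      (fun we kw =>
        let pos := PySem.Chars.findFrom u kw ((wsN + 5 : Nat) : Int)
        if pos ≠ -1 ∧ pos < (we : Int) ∧ d[pos.toNat]! = 0 ∧ rm[pos.toNat - wsN]! ≥ 0 then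
          pos.toNat
        else we) s.length
    String.ofList (PySem.Chars.strip (PySem.List.slice s (some (wsN : Int)) (some (we : Int))))

-- ===== PRECONDITION & SPEC =====
def Spec_extract_where_clause_py (sql : String) (out : String) : Prop := out = extract_where_clause_py_alt sql
instance (sql : String) (out : String) : Decidable (Spec_extract_where_clause_py sql out) := by unfold Spec_extract_where_clause_py; infer_instance

-- ===== CLAIM (what is proved, stated in full; the proofs are below) =====
def Claim_equal_extract_where_clause_py : Prop := ∀ (sql : String), Dom_extract_where_clause_py sql → Spec_extract_where_clause_py sql (extract_where_clause_py sql)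

-- ===== LEMMAS AND PROOFS =====

-- the paren contribution of one character
def pvDelta (c : Char) : Int := if c = '(' then 1 else if c = ')' then -1 else 0

-- paren depth just before index i
def pvDepAt (s : List Char) (i : Nat) : Int := ((s.take i).map pvDelta).sum

theorem pvDelta_upperChar (c : Char) : pvDelta (PySem.Chars.upperChar c) = pvDelta c := by
  unfold PySem.Chars.upperChar
  by_cases h : PySem.Chars.islower c = true
  · simp only [h, if_true]
    simp [PySem.Chars.islower, Char.le_def, UInt32.le_iff_toNat_le] at h
    have hop : '('.toNat = 40 := rfl
    have hcp : ')'.toNat = 41 := rfl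
    have h2 : (Char.ofNat (c.toNat - 32)).toNat = c.toNat - 32 := by
      unfold Char.ofNat
      split
      case isTrue => rfl
      case isFalse hf => exact absurd (Or.inl (by omega)) hf
    have hne1 : Char.ofNat (c.toNat - 32) ≠ '(' := fun he => by
      have := congrArg Char.toNat he; rw [h2, hop] at this; omega
    have hne2 : Char.ofNat (c.toNat - 32) ≠ ')' := fun he => by
      have := congrArg Char.toNat he; rw [h2, hcp] at this; omega
    have hc1 : c ≠ '(' := fun he => by
      have := congrArg Char.toNat he; rw [hop] at this; omega
    have hc2 : c ≠ ')' := fun he => by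
      have := congrArg Char.toNat he; rw [hcp] at this; omega
    simp [pvDelta, hne1, hne2, hc1, hc2]
  · simp [h]

theorem pvDepAt_upper (s : List Char) (i : Nat) :
    pvDepAt (PySem.Chars.upper s) i = pvDepAt s i := by
  unfold pvDepAt PySem.Chars.upper
  rw [List.map_take, List.map_map]
  congr 1
  rw [List.map_take]
  congr 1
  exact List.map_congr_left (fun c _ => pvDelta_upperChar c)

theorem pvDepAt_succ (s : List Char) (i : Nat) (h : i < s.length) :
    pvDepAt s (i + 1) = pvDepAt s i + pvDelta s[i]! := by
  unfold pvDepAt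
  rw [List.take_add_one, List.map_append, List.sum_append, getElem!_pos s i h]
  simp [List.getElem?_eq_getElem h]

theorem pvDepAt_cons (c : Char) (rest : List Char) (i : Nat) :
    pvDepAt (c :: rest) (i + 1) = pvDelta c + pvDepAt rest i := by
  simp [pvDepAt, List.take_succ_cons]

theorem pvB_depths_length (cur : Int) (u : List Char) :
    (pvB_depths cur u).length = u.length + 1 := by
  induction u generalizing cur with
  | nil => rfl
  | cons c rest ih => simp [pvB_depths, ih]

theorem pvB_depths_get (u : List Char) (cur : Int) (i : Nat) (h : i ≤ u.length) :
    (pvB_depths cur u)[i]! = cur + pvDepAt u i := by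
  induction u generalizing cur i with
  | nil =>
    have : i = 0 := by simpa using h
    subst this
    simp [pvB_depths, pvDepAt]
  | cons c rest ih =>
    cases i with
    | zero => simp [pvB_depths, pvDepAt]
    | succ i =>
      rw [pvB_depths, List.getElem!_cons_succ, ih _ i (by simpa using h), pvDepAt_cons]
      simp [pvDelta]
      ring

theorem pvMatch_head {u : List Char} {i : Nat} (h : i < u.length)
    (hm : (u.drop i).take 5 = "WHERE".toList) : u[i]! = 'W' := by
  have hd : u.drop i = u[i] :: u.drop (i + 1) := (List.getElem_cons_drop h).symm
  rw [hd, List.take_succ_cons] at hm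
  rw [getElem!_pos u i h]
  exact (List.cons.injEq _ _ _ _ ▸ hm).1

theorem pvMatch_len {u : List Char} {i : Nat}
    (hm : (u.drop i).take 5 = "WHERE".toList) : i + 5 ≤ u.length := by
  have := congrArg List.length hm
  simp [List.length_take, List.length_drop] at this
  omega

theorem pvFind_eq (u : List Char) (k i : Nat) (hk : u.length - i ≤ k) :
    pvA_findWhere u i (pvDepAt u i) = pvB_findWhere u (pvB_depths 0 u) i := by
  induction k generalizing i with
  | zero =>
    rw [pvA_findWhere, pvB_findWhere]
    have : ¬ i < u.length := by omega
    simp [this]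
  | succ k ih =>
    rw [pvA_findWhere, pvB_findWhere]
    by_cases h : i < u.length
    · simp only [h, dif_pos]
      have hget : (pvB_depths 0 u)[i]! = pvDepAt u i := by
        rw [pvB_depths_get u 0 i (le_of_lt h)]; ring
      by_cases hop : u[i]! = '('
      · have hm : ¬ (u.drop i).take 5 = "WHERE".toList := fun hm => by
          have := pvMatch_head h hm; rw [hop] at this; simp at this
        simp only [hop, if_pos, hget, hm, and_false, if_false]
        have : pvDepAt u i + 1 = pvDepAt u (i + 1) := by
          rw [pvDepAt_succ u i h, hop]; simp [pvDelta]
        rw [this]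
        exact ih (i + 1) (by omega)
      · by_cases hcl : u[i]! = ')'
        · have hm : ¬ (u.drop i).take 5 = "WHERE".toList := fun hm => by
            have := pvMatch_head h hm; rw [hcl] at this; simp at this
          simp only [hcl, if_pos, hget, hm, and_false, if_false]
          have : pvDepAt u i - 1 = pvDepAt u (i + 1) := by
            rw [pvDepAt_succ u i h, hcl]
            have hm1 : pvDelta ')' = -1 := rfl
            rw [hm1]; ring
          rw [this]
          exact ih (i + 1) (by omega)
        · simp only [hop, hcl, hget]
          by_cases hc : pvDepAt u i = 0 ∧ (u.drop i).take 5 = "WHERE".toList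
          · simp [hc]
          · simp only [hc, if_false]
            have : pvDepAt u i = pvDepAt u (i + 1) := by
              have hd0 : pvDelta u[i]! = 0 := by unfold pvDelta; rw [if_neg hop, if_neg hcl]
              rw [pvDepAt_succ u i h, hd0, add_zero]
            rw [this]
            exact ih (i + 1) (by omega)
    · simp [h]

theorem pvB_find_spec (u : List Char) (k i : Nat) (hk : u.length - i ≤ k)
    (h : pvB_findWhere u (pvB_depths 0 u) i ≠ -1) :
    i ≤ (pvB_findWhere u (pvB_depths 0 u) i).toNat ∧
    (pvB_findWhere u (pvB_depths 0 u) i).toNat < u.length ∧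
    pvDepAt u ((pvB_findWhere u (pvB_depths 0 u) i).toNat) = 0 ∧
    (u.drop (pvB_findWhere u (pvB_depths 0 u) i).toNat).take 5 = "WHERE".toList := by
  induction k generalizing i with
  | zero =>
    rw [pvB_findWhere] at h ⊢
    have : ¬ i < u.length := by omega
    simp [this] at h
  | succ k ih =>
    rw [pvB_findWhere] at h ⊢
    by_cases hlt : i < u.length
    · simp only [hlt, dif_pos] at h ⊢
      by_cases hc : (pvB_depths 0 u)[i]! = 0 ∧ (u.drop i).take 5 = "WHERE".toList
      · rw [if_pos hc]
        simp only [Int.toNat_natCast]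
        refine ⟨le_refl _, hlt, ?_, hc.2⟩
        have := hc.1
        rw [pvB_depths_get u 0 i (le_of_lt hlt)] at this
        omega
      · simp only [hc, if_false] at h ⊢
        have := ih (i + 1) (by omega) h
        exact ⟨by omega, this.2⟩
    · simp [hlt] at h

theorem pvScan_iff (s : List Char) (pos : Nat) (hp : pos ≤ s.length) (k : Nat) :
    ∀ j, pos - j ≤ k → j ≤ pos → ∀ dep : Int,
    ((pvA_scan s pos j dep).1 = true ∧ (pvA_scan s pos j dep).2 = 0)
      ↔ (dep + pvDepAt s pos - pvDepAt s j = 0 ∧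
         ∀ m, j < m → m ≤ pos → dep + pvDepAt s m - pvDepAt s j ≥ 0) := by
  induction k with
  | zero =>
    intro j hk hj dep
    have hje : j = pos := by omega
    subst hje
    rw [pvA_scan, dif_neg (lt_irrefl _)]
    constructor
    · rintro ⟨-, h2⟩
      have h2' : dep = 0 := h2
      exact ⟨by linarith, fun m h1 h2 => absurd (lt_of_lt_of_le h1 h2) (lt_irrefl _)⟩
    · rintro ⟨h1, -⟩
      exact ⟨rfl, by simp; linarith⟩
  | succ k ih =>
    intro j hk hj dep
    by_cases h : j < pos
    · rw [pvA_scan]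
      simp only [h, dif_pos]
      have hdd : (if s[j]! = '(' then dep + 1 else if s[j]! = ')' then dep - 1 else dep)
          = dep + pvDelta s[j]! := by
        unfold pvDelta
        split_ifs <;> ring
      rw [hdd]
      have hsucc := pvDepAt_succ s j (lt_of_lt_of_le h hp)
      by_cases hneg : dep + pvDelta s[j]! < 0
      · rw [if_pos hneg]
        simp only [Bool.false_eq_true, false_and, false_iff]
        rintro ⟨-, hall⟩
        have := hall (j + 1) (by omega) (by omega)
        rw [hsucc] at this
        omega
      · rw [if_neg hneg]
        rw [ih (j + 1) (by omega) (by omega) (dep + pvDelta s[j]!)]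
        constructor
        · rintro ⟨h1, hall⟩
          refine ⟨by linarith, ?_⟩
          intro m hm1 hm2
          rcases Nat.lt_or_ge (j + 1) m with hc | hc
          · have := hall m hc hm2
            linarith
          · have hme : m = j + 1 := by omega
            subst hme
            rw [hsucc]
            linarith
        · rintro ⟨h1, hall⟩
          refine ⟨by linarith, ?_⟩
          intro m hm1 hm2
          have := hall m (by omega) hm2
          linarith
    · have hje : j = pos := by omega
      subst hje
      rw [pvA_scan, dif_neg (lt_irrefl _)]
      constructor
      · rintro ⟨-, h2⟩
        have h2' : dep = 0 := h2
        exact ⟨by linarith, fun m h1 h2 => absurd (lt_of_lt_of_le h1 h2) (lt_irrefl _)⟩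
      · rintro ⟨h1, -⟩
        exact ⟨rfl, by simp; linarith⟩

theorem pvMins_get_nonneg (l : List Int) (cur : Int) (k : Nat) (h : k ≤ l.length) :
    ((pvB_mins cur l)[k]! ≥ 0 ↔ cur ≥ 0 ∧ ∀ i, i < k → l[i]! ≥ 0) := by
  induction l generalizing cur k with
  | nil =>
    have : k = 0 := by simpa using h
    subst this
    simp [pvB_mins]
  | cons x rest ih =>
    cases k with
    | zero => simp [pvB_mins]
    | succ k =>
      rw [pvB_mins, List.getElem!_cons_succ, ih (min cur x) k (by simpa using h)]
      constructor
      · rintro ⟨h1, hall⟩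
        refine ⟨by omega, ?_⟩
        intro i hi
        cases i with
        | zero => rw [List.getElem!_cons_zero]; omega
        | succ i => rw [List.getElem!_cons_succ]; exact hall i (by omega)
      · rintro ⟨h1, hall⟩
        have hx := hall 0 (by omega)
        rw [List.getElem!_cons_zero] at hx
        refine ⟨by omega, ?_⟩
        intro i hi
        have := hall (i + 1) (by omega)
        rwa [List.getElem!_cons_succ] at this

-- the per-keyword fold steps of the two ports agree, once where_start is a top-level 'WHERE'
theorem pvStep_eq (s : List Char) (wsN : Nat)
    (hws : wsN < (PySem.Chars.upper s).length)
    (hdep0 : pvDepAt (PySem.Chars.upper s) wsN = 0)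
    (hmatch : ((PySem.Chars.upper s).drop wsN).take 5 = "WHERE".toList)
    (kw : List Char) (hkw : kw ≠ []) (we : Int) :
    (let pos := PySem.Chars.findFrom (PySem.Chars.upper s) kw (Nat.cast (wsN + 5) : Int)
     if pos ≠ -1 ∧ pos < we then
       let r := pvA_scan s pos.toNat wsN 0
       if r.1 ∧ r.2 = 0 then (pos.toNat : Int) else we
     else we)
    =
    (let pos := PySem.Chars.findFrom (PySem.Chars.upper s) kw (Nat.cast (wsN + 5) : Int)
     if pos ≠ -1 ∧ pos < we ∧
        (pvB_depths 0 (PySem.Chars.upper s))[pos.toNat]! = 0 ∧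
        (pvB_mins ((pvB_depths 0 (PySem.Chars.upper s))[wsN]!)
          ((pvB_depths 0 (PySem.Chars.upper s)).drop (wsN + 1)))[pos.toNat - wsN]! ≥ 0 then
       (pos.toNat : Int)
     else we) := by
  have hu5 : wsN + 5 ≤ (PySem.Chars.upper s).length := pvMatch_len hmatch
  have hlenu : (PySem.Chars.upper s).length = s.length := by
    simp [PySem.Chars.upper]
  by_cases hpos : PySem.Chars.findFrom (PySem.Chars.upper s) kw (Nat.cast (wsN + 5) : Int) = -1
  · rw [if_neg (fun hc => hc.1 hpos), if_neg (fun hc => hc.1 hpos)]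
  · obtain ⟨hge, hpre, -⟩ :=
      PySem.Chars.findFrom_natCast_spec (PySem.Chars.upper s) kw (wsN + 5) hu5 hpos
    have hplt : (PySem.Chars.findFrom (PySem.Chars.upper s) kw (Nat.cast (wsN + 5) : Int)).toNat
        < (PySem.Chars.upper s).length := by
      rcases hpre with ⟨t, ht⟩
      have := congrArg List.length ht
      simp only [List.length_drop, List.length_append] at this
      cases kw with
      | nil => exact absurd rfl hkw
      | cons a b => simp only [List.length_cons] at this; omega
    set P := PySem.Chars.findFrom (PySem.Chars.upper s) kw (Nat.cast (wsN + 5) : Int) with hP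
    have hge' : wsN + 5 ≤ P.toNat := by
      have h0 : (0 : Int) ≤ P := le_trans (by positivity) hge
      omega
    by_cases hlt : P < we
    · rw [if_pos ⟨hpos, hlt⟩]
      -- characterisation of A's rescan
      have hfun : pvDepAt (PySem.Chars.upper s) = pvDepAt s := funext (pvDepAt_upper s)
      have hA := pvScan_iff s P.toNat (by omega) P.toNat wsN (by omega) (by omega) 0
      rw [← hfun] at hA
      -- characterisation of B's table lookups
      have hd := pvB_depths_get (PySem.Chars.upper s) 0 P.toNat (le_of_lt hplt)
      have hdws := pvB_depths_get (PySem.Chars.upper s) 0 wsN (le_of_lt hws)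
      have hlen_drop : ((pvB_depths 0 (PySem.Chars.upper s)).drop (wsN + 1)).length
          = (PySem.Chars.upper s).length - wsN := by
        simp [pvB_depths_length]
      have hmins := pvMins_get_nonneg ((pvB_depths 0 (PySem.Chars.upper s)).drop (wsN + 1))
        ((pvB_depths 0 (PySem.Chars.upper s))[wsN]!) (P.toNat - wsN) (by omega)
      have hdropget : ∀ i, i < (PySem.Chars.upper s).length - wsN →
          ((pvB_depths 0 (PySem.Chars.upper s)).drop (wsN + 1))[i]!
            = pvDepAt (PySem.Chars.upper s) (wsN + 1 + i) := by
        intro i hi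
        rw [getElem!_pos _ i (by omega), List.getElem_drop,
          ← getElem!_pos (pvB_depths 0 (PySem.Chars.upper s)) (wsN + 1 + i)
            (by rw [pvB_depths_length]; omega),
          pvB_depths_get (PySem.Chars.upper s) 0 (wsN + 1 + i) (by omega)]
        ring
      have hiff : ((pvA_scan s P.toNat wsN 0).1 = true ∧ (pvA_scan s P.toNat wsN 0).2 = 0)
          ↔ ((pvB_depths 0 (PySem.Chars.upper s))[P.toNat]! = 0 ∧
             (pvB_mins ((pvB_depths 0 (PySem.Chars.upper s))[wsN]!)
               ((pvB_depths 0 (PySem.Chars.upper s)).drop (wsN + 1)))[P.toNat - wsN]! ≥ 0) := by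
        rw [hA, hmins, hd, hdws, hdep0]
        constructor
        · rintro ⟨h1, hall⟩
          refine ⟨by linarith, by norm_num, ?_⟩
          intro i hi
          have := hall (wsN + 1 + i) (by omega) (by omega)
          rw [hdropget i (by omega)]
          linarith
        · rintro ⟨h1, -, hall⟩
          refine ⟨by linarith, ?_⟩
          intro m hm1 hm2
          have := hall (m - wsN - 1) (by omega)
          rw [hdropget (m - wsN - 1) (by omega)] at this
          have heq : wsN + 1 + (m - wsN - 1) = m := by omega
          rw [heq] at this
          linarith
      by_cases hsc : (pvA_scan s P.toNat wsN 0).1 = true ∧ (pvA_scan s P.toNat wsN 0).2 = 0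
      · rw [if_pos hsc, if_pos ⟨hpos, hlt, hiff.mp hsc⟩]
      · rw [if_neg hsc, if_neg (fun hB => hsc (hiff.mpr hB.2.2))]
    · rw [if_neg (fun hc => hlt hc.2), if_neg (fun hc => hlt hc.2.1)]

-- ===== VERDICT (by name: the statement is the Claim_ definition above) =====
theorem extract_where_clause_py_spec : Claim_equal_extract_where_clause_py := by
  unfold Claim_equal_extract_where_clause_py Spec_extract_where_clause_py
  intro sql _
  unfold extract_where_clause_py extract_where_clause_py_alt
  simp only []
  have h0 : pvDepAt (PySem.Chars.upper sql.toList) 0 = 0 := rfl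
  have hfind : pvA_findWhere (PySem.Chars.upper sql.toList) 0 0
      = pvB_findWhere (PySem.Chars.upper sql.toList)
          (pvB_depths 0 (PySem.Chars.upper sql.toList)) 0 := by
    have := pvFind_eq (PySem.Chars.upper sql.toList) (PySem.Chars.upper sql.toList).length 0
      (by omega)
    rwa [h0] at this
  rw [hfind]
  by_cases hws : pvB_findWhere (PySem.Chars.upper sql.toList)
      (pvB_depths 0 (PySem.Chars.upper sql.toList)) 0 = -1
  · rw [if_pos hws, if_pos hws]
  · rw [if_neg hws, if_neg hws]
    obtain ⟨-, hlt, hdep0, hmatch⟩ := pvB_find_spec (PySem.Chars.upper sql.toList)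
      (PySem.Chars.upper sql.toList).length 0 (by omega) hws
    congr 3
    congr 1
    apply PySem.List.foldl_congr_mem
    intro acc kw hkw
    have hne : kw ≠ [] := by
      simp only [List.mem_map, List.mem_cons, List.not_mem_nil, or_false] at hkw
      rcases hkw with ⟨w, hw, rfl⟩
      rcases hw with rfl | rfl | rfl | rfl | rfl <;> decide
    exact pvStep_eq sql.toList _ hlt hdep0 hmatch kw hne acc
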